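-- pv_equiv track=rewrite | github.com/yusufmedhat/process-mining-prototype | venv/Lib/site-packages/pm4py/algo/concept_drift/variants/bose.py | compute_follows_relation
-- ===== SOURCE A (Python) =====
-- def compute_follows_relation(trace, Sigma):
--     """
--     Compute the 'eventually follows' relation for a single trace.
--
--     GLOBAL FOLLOWS (original):
--     - For each activity 'a' encountered so far,
--       mark that 'a' is followed by the current activity.
--
--     DIRECT FOLLOWS (commented out):
--     - For each consecutive pair (a, b), add (a, b).
--     """
--     follows_in_trace = set()
--
--     # --- GLOBAL FOLLOWS version (as in your original code) ---
--     seen = set()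
--     for activity in trace:
--         for a in seen:
--             if activity in Sigma:
--                 follows_in_trace.add((a, activity))
--         seen.add(activity)
--
--     # --- DIRECT FOLLOWS version  ---
--     # for idx in range(len(trace) - 1):
--     #     a = trace[idx]
--     #     b = trace[idx + 1]
--     #     if a in Sigma and b in Sigma:
--     #         follows_in_trace.add((a, b))
--
--     return follows_in_trace
-- ===== SOURCE B (Python) =====
-- def compute_follows_relation(trace, Sigma):
--     """Eventually-follows pairs via first/previous-occurrence indices:
--     (a, b) holds iff some occurrence of b (with b in Sigma) comes strictly
--     after the first occurrence of a.  Each pair is produced exactly once,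
--     at the first occurrence of b after first[a], so no output dedup set is
--     needed."""
--     sig = set(Sigma)
--     first = {}   # activity -> index of its first occurrence (so far)
--     prev = {}    # activity -> index of its previous occurrence (Sigma only)
--     out = []
--     j = 0
--     for b in trace:
--         if b in sig:
--             p = prev.get(b, -1)
--             for a, fa in first.items():
--                 if p <= fa:
--                     out.append((a, b))
--             prev[b] = j
--         if b not in first:
--             first[b] = j
--         j += 1
--     return set(out)
-- ===== Notes on version B (the rewrite author's own statement) =====
-- stated objective: alternative
-- what changed: A's seen-set plus output-set double loop (re-adding every (seen, activity) pair at each step) is replaced by first-occurrence and previous-occurrence index dictionaries: at each Sigma-activity only the activities whose first occurrence is at or after its previous occurrence are emitted, so each pair is produced exactly once and no output deduplication set is needed.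
import Mathlib
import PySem

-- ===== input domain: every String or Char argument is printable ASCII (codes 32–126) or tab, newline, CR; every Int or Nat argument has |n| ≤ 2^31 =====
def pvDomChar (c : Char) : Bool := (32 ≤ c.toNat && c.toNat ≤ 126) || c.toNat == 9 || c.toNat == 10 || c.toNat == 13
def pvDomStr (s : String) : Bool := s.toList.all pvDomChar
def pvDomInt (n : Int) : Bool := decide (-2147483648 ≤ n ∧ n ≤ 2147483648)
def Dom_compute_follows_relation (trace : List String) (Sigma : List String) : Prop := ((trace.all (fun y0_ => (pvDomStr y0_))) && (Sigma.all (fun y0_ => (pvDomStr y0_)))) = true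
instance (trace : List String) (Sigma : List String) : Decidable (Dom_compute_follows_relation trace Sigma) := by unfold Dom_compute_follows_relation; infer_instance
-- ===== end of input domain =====

-- B replaces A's seen-set / output-set double loop by first/previous-occurrence
-- index dictionaries that emit each pair exactly once (objective: alternative).
-- Both functions return a Python set; the ports return its element list and the
-- equality proved is about that list (the set contents in first-insertion order).

-- ===== PORT A =====
def followsStepA (Sigma : List String) (st : PySem.Set (String × String) × PySem.Set String)
    (activity : String) : PySem.Set (String × String) × PySem.Set String :=
  (st.2.foldl (fun f a => if activity ∈ Sigma then PySem.Set.add f (a, activity) else f) st.1,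
   PySem.Set.add st.2 activity)

def compute_follows_relation (trace : List String) (Sigma : List String) : List (String × String) :=
  (trace.foldl (followsStepA Sigma) (PySem.Set.empty, PySem.Set.empty)).1

-- ===== PORT B =====
def followsStepB (sig : PySem.Set String)
    (st : PySem.Dict String Int × PySem.Dict String Int × List (String × String) × Int)
    (b : String) : PySem.Dict String Int × PySem.Dict String Int × List (String × String) × Int :=
  let first := st.1
  let prev := st.2.1
  let out := st.2.2.1
  let j := st.2.2.2
  let pr : PySem.Dict String Int × List (String × String) :=
    if PySem.Set.contains sig b then
      let p := prev.getD b (-1)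
      (prev.insert b j,
       first.items.foldl (fun o afa => if p ≤ afa.2 then o ++ [(afa.1, b)] else o) out)
    else (prev, out)
  (if first.contains b then first else first.insert b j, pr.1, pr.2, j + 1)

def compute_follows_relation_alt (trace : List String) (Sigma : List String) : List (String × String) :=
  let sig : PySem.Set String := PySem.Set.ofList Sigma
  let st := trace.foldl (followsStepB sig) (PySem.Dict.empty, PySem.Dict.empty, [], 0)
  PySem.Set.ofList st.2.2.1

-- ===== PRECONDITION & SPEC =====
def Spec_compute_follows_relation (trace : List String) (Sigma : List String) (out : List (String × String)) : Prop := out = compute_follows_relation_alt trace Sigma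
instance (trace : List String) (Sigma : List String) (out : List (String × String)) : Decidable (Spec_compute_follows_relation trace Sigma out) := by unfold Spec_compute_follows_relation; infer_instance

-- ===== CLAIM (what is proved, stated in full; the proofs are below) =====
def Claim_equal_compute_follows_relation : Prop := ∀ (trace : List String) (Sigma : List String), Dom_compute_follows_relation trace Sigma → Spec_compute_follows_relation trace Sigma (compute_follows_relation trace Sigma)

-- ===== LEMMAS AND PROOFS =====

-- Coupling invariant between A's state (F = follows set, S = seen set) and
-- B's state (first/prev occurrence dicts, out list, position counter j).
def FollowsInv (F : PySem.Set (String × String)) (S : PySem.Set String)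
    (first prev : PySem.Dict String Int) (out : List (String × String)) (j : Int) : Prop :=
  0 ≤ j ∧ F.Nodup ∧ first.keys.Nodup ∧ S = first.keys ∧ out = F ∧
  (∀ k v, first.get? k = some v → 0 ≤ v ∧ v < j) ∧
  (∀ k v, prev.get? k = some v → v < j) ∧
  (∀ a c : String, (a, c) ∈ F ↔
     ∃ fa, first.get? a = some fa ∧ ∃ pc, prev.get? c = some pc ∧ fa < pc)

lemma foldlA_of_mem (Sigma : List String) (x : String) (hx : x ∈ Sigma)
    (S : List String) (F : PySem.Set (String × String)) :
    S.foldl (fun f a => if x ∈ Sigma then PySem.Set.add f (a, x) else f) F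
      = PySem.Set.update F (S.map (fun a => (a, x))) := by
  have h : (fun (f : PySem.Set (String × String)) (a : String) =>
      if x ∈ Sigma then PySem.Set.add f (a, x) else f)
      = fun f a => PySem.Set.add f (a, x) := by
    funext f a; exact if_pos hx
  rw [h, PySem.Set.update_map_eq_foldl_add]

lemma foldlA_of_not_mem (Sigma : List String) (x : String) (hx : x ∉ Sigma)
    (S : List String) (F : PySem.Set (String × String)) :
    S.foldl (fun f a => if x ∈ Sigma then PySem.Set.add f (a, x) else f) F = F := by
  induction S generalizing F with
  | nil => rfl
  | cons a S ih => simpa only [List.foldl, if_neg hx] using ih F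

lemma foldlB_eq (p0 : Int) (x : String) (items : List (String × Int)) (out : List (String × String)) :
    items.foldl (fun o afa => if p0 ≤ afa.2 then o ++ [(afa.1, x)] else o) out
      = out ++ (items.filter (fun afa => decide (p0 ≤ afa.2))).map (fun afa => (afa.1, x)) := by
  have h : (fun (o : List (String × String)) (afa : String × Int) =>
      if p0 ≤ afa.2 then o ++ [(afa.1, x)] else o)
      = fun o afa => if (fun afa : String × Int => decide (p0 ≤ afa.2)) afa = true
          then o ++ [(fun afa : String × Int => (afa.1, x)) afa] else o := by
    funext o afa; simp
  rw [h, PySem.List.foldl_append_if]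

-- The new pairs A adds at one step, rewritten as B's filtered items list.
lemma newlist_eq (x : String) (F : PySem.Set (String × String))
    (first prev : PySem.Dict String Int) (hknd : first.keys.Nodup)
    (h0 : ∀ k v, first.get? k = some v → 0 ≤ v)
    (hmem : ∀ a c : String, (a, c) ∈ F ↔
       ∃ fa, first.get? a = some fa ∧ ∃ pc, prev.get? c = some pc ∧ fa < pc) :
    (first.keys.map (fun a => (a, x))).filter (fun y => !PySem.Set.contains F y)
      = (first.items.filter (fun afa => decide (prev.getD x (-1) ≤ afa.2))).map
          (fun afa => (afa.1, x)) := by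
  have hkeys : first.keys = first.items.map Prod.fst := rfl
  rw [hkeys, List.map_map, List.filter_map]
  refine congrArg _ (List.filter_congr ?_)
  rintro ⟨a, fa⟩ hafa
  have hget : first.get? a = some fa := PySem.Dict.get?_of_mem_items first hafa hknd
  have hF : (a, x) ∈ F ↔ ∃ pc, prev.get? x = some pc ∧ fa < pc := by
    rw [hmem a x]
    constructor
    · rintro ⟨fa', hfa', pc, hpc, hlt⟩
      rw [hget] at hfa'; cases hfa'; exact ⟨pc, hpc, hlt⟩
    · rintro ⟨pc, hpc, hlt⟩; exact ⟨fa, hget, pc, hpc, hlt⟩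
  have hcontains : PySem.Set.contains F ((a, fa).1, x) = decide ((a, x) ∈ F) := by
    simp [PySem.Set.contains_eq_listContains]
  cases hpv : prev.get? x with
  | none =>
    have hgd : prev.getD x (-1) = -1 := by
      rw [PySem.Dict.getD_eq_get?_getD, hpv]; rfl
    have : ¬ (a, x) ∈ F := by
      rw [hF]; rintro ⟨pc, hpc, _⟩; rw [hpv] at hpc; cases hpc
    simp [this, hgd]
    exact neg_le_of_neg_le (by linarith [h0 a fa hget])
  | some pc =>
    have hgd : prev.getD x (-1) = pc := by
      rw [PySem.Dict.getD_eq_get?_getD, hpv]; rfl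
    have : (a, x) ∈ F ↔ fa < pc := by
      rw [hF]
      constructor
      · rintro ⟨pc', hpc', hlt⟩; rw [hpv] at hpc'; cases hpc'; exact hlt
      · intro hlt; exact ⟨pc, hpv, hlt⟩
    by_cases hlt : fa < pc
    · simp [this.mpr hlt, hgd, not_le.mpr hlt]
    · simp [hgd, not_lt.mp hlt]
      intro hc; exact hlt (this.mp hc)

-- helper: replacing first by (insert x j) on the right-hand side of the
-- membership characterisation changes nothing when every prev' value is ≤ j.
lemma first_insert_rhs (first prev' : PySem.Dict String Int) (x a c : String) (j : Int)
    (hple : ∀ k v, prev'.get? k = some v → v ≤ j) :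
    (∃ fa, (if first.contains x then first else first.insert x j).get? a = some fa ∧
        ∃ pc, prev'.get? c = some pc ∧ fa < pc)
      ↔ (∃ fa, first.get? a = some fa ∧ ∃ pc, prev'.get? c = some pc ∧ fa < pc) := by
  by_cases hcx : first.contains x = true
  · rw [if_pos hcx]
  · rw [if_neg hcx]
    by_cases ha : a = x
    · subst ha
      rw [PySem.Dict.get?_insert_self]
      have hnone : first.get? a = none := (PySem.Dict.get?_eq_none_iff_contains _ _).mpr
        (Bool.not_eq_true _ ▸ (by simpa using hcx))
      constructor
      · rintro ⟨fa, hfa, pc, hpc, hlt⟩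
        cases hfa
        exact absurd hlt (not_lt.mpr (hple c pc hpc))
      · rintro ⟨fa, hfa, _⟩
        rw [hnone] at hfa; cases hfa
    · rw [PySem.Dict.get?_insert _ _ _ _, if_neg ha]

lemma step_inv (Sigma : List String) (x : String)
    {F : PySem.Set (String × String)} {S : PySem.Set String}
    {first prev : PySem.Dict String Int} {out : List (String × String)} {j : Int}
    (h : FollowsInv F S first prev out j) :
    FollowsInv (followsStepA Sigma (F, S) x).1 (followsStepA Sigma (F, S) x).2
      (followsStepB (PySem.Set.ofList Sigma) (first, prev, out, j) x).1
      (followsStepB (PySem.Set.ofList Sigma) (first, prev, out, j) x).2.1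
      (followsStepB (PySem.Set.ofList Sigma) (first, prev, out, j) x).2.2.1
      (followsStepB (PySem.Set.ofList Sigma) (first, prev, out, j) x).2.2.2 := by
  obtain ⟨hj, hFnd, hknd, hS, hout, hfirst, hprev, hmem⟩ := h
  subst hS
  have hfirstkeys : ∀ {k : String} {v : Int}, first.get? k = some v → (k, v) ∈ first.items :=
    fun h => PySem.Dict.mem_items_of_get?_eq_some first h
  -- the updated first dict behaves the same in both branches on Sigma
  have hkeys' : PySem.Set.add first.keys x
      = (if first.contains x then first else first.insert x j).keys := by
    by_cases hcx : first.contains x = true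
    · rw [if_pos hcx, PySem.Set.add_of_mem ((PySem.Dict.contains_iff_mem_keys _ _).mp hcx)]
    · rw [if_neg hcx,
        PySem.Set.add_of_not_mem (fun hm => hcx ((PySem.Dict.contains_iff_mem_keys _ _).mpr hm)),
        PySem.Dict.keys_insert_of_not_contains _ _ (by simpa using hcx)]
  have hknd' : (if first.contains x then first else first.insert x j).keys.Nodup := by
    by_cases hcx : first.contains x = true
    · rw [if_pos hcx]; exact hknd
    · rw [if_neg hcx]; exact PySem.Dict.nodup_keys_insert _ _ _ hknd
  have hfirst' : ∀ k v,
      (if first.contains x then first else first.insert x j).get? k = some v →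
        0 ≤ v ∧ v < j + 1 := by
    intro k v hkv
    by_cases hcx : first.contains x = true
    · rw [if_pos hcx] at hkv
      exact ⟨(hfirst k v hkv).1, by have := (hfirst k v hkv).2; omega⟩
    · rw [if_neg hcx, PySem.Dict.get?_insert] at hkv
      by_cases hk : k = x
      · rw [if_pos hk] at hkv; cases hkv; exact ⟨hj, by omega⟩
      · rw [if_neg hk] at hkv
        exact ⟨(hfirst k v hkv).1, by have := (hfirst k v hkv).2; omega⟩
  by_cases hx : x ∈ Sigma
  · -- Sigma case: A adds (a, x) for every seen a; B emits the window and bumps prev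
    have hsig : PySem.Set.contains (PySem.Set.ofList Sigma) x = true :=
      (PySem.Set.contains_iff _ _).mpr ((PySem.Set.mem_ofList Sigma x).mpr hx)
    have hSnd : first.keys.Nodup := hknd
    have hmapnd : (first.keys.map (fun a => (a, x))).Nodup :=
      hSnd.map (fun a b hab => congrArg Prod.fst hab)
    have hnew := newlist_eq x F first prev hknd (fun k v h => (hfirst k v h).1) hmem
    have hAfold : first.keys.foldl
        (fun f a => if x ∈ Sigma then PySem.Set.add f (a, x) else f) F
        = F ++ (first.items.filter
            (fun afa => decide (prev.getD x (-1) ≤ afa.2))).map (fun afa => (afa.1, x)) := by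
      rw [foldlA_of_mem Sigma x hx, PySem.Set.update_eq_append_filter,
        PySem.Set.ofList_eq_self_of_nodup _ hmapnd, hnew]
    have hBfold := foldlB_eq (prev.getD x (-1)) x first.items out
    have hnd' : (F ++ (first.items.filter
        (fun afa => decide (prev.getD x (-1) ≤ afa.2))).map (fun afa => (afa.1, x))).Nodup := by
      rw [← hnew]
      refine hFnd.append (hmapnd.filter _) ?_
      intro y hyF hyfil
      have h2 := (List.mem_filter.mp hyfil).2
      simp only [PySem.Set.contains_eq_listContains, Bool.not_eq_true',
        List.contains_eq_mem, decide_eq_false_iff_not] at h2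
      exact h2 hyF
    have hple : ∀ k v, (prev.insert x j).get? k = some v → v ≤ j := by
      intro k v hkv
      rw [PySem.Dict.get?_insert] at hkv
      by_cases hk : k = x
      · rw [if_pos hk] at hkv; cases hkv; exact le_refl _
      · rw [if_neg hk] at hkv; exact le_of_lt (hprev k v hkv)
    simp only [followsStepA, followsStepB, hsig, if_true]
    refine ⟨by omega, ?_, hknd', hkeys', ?_, hfirst', ?_, ?_⟩
    · rw [hAfold]; exact hnd'
    · rw [hAfold, hBfold, hout]
    · intro k v hkv
      rw [PySem.Dict.get?_insert] at hkv
      by_cases hk : k = x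
      · rw [if_pos hk] at hkv; cases hkv; omega
      · rw [if_neg hk] at hkv; have := hprev k v hkv; omega
    · intro a c
      rw [hAfold, List.mem_append,
        first_insert_rhs first (prev.insert x j) x a c j hple]
      have hnm : (a, c) ∈ (first.items.filter
          (fun afa => decide (prev.getD x (-1) ≤ afa.2))).map (fun afa => (afa.1, x))
          ↔ c = x ∧ ∃ fa, (a, fa) ∈ first.items ∧ prev.getD x (-1) ≤ fa := by
        constructor
        · intro hm
          obtain ⟨⟨a', fa⟩, hin, heq⟩ := List.mem_map.mp hm
          obtain ⟨hit, hq⟩ := List.mem_filter.mp hin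
          cases heq
          exact ⟨rfl, fa, hit, of_decide_eq_true hq⟩
        · rintro ⟨hc, fa, hit, hq⟩
          subst hc
          exact List.mem_map.mpr ⟨(a, fa), List.mem_filter.mpr ⟨hit, decide_eq_true hq⟩, rfl⟩
      by_cases hc : c = x
      · subst hc
        rw [hnm]
        constructor
        · rintro (hF | ⟨-, fa, hit, hq⟩)
          · obtain ⟨fa, hga, pc, hpc, hlt⟩ := (hmem a c).mp hF
            exact ⟨fa, hga, j, PySem.Dict.get?_insert_self _ _ _,
              lt_of_lt_of_le hlt (le_of_lt (hprev c pc hpc))⟩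
          · exact ⟨fa, PySem.Dict.get?_of_mem_items first hit hknd, j,
              PySem.Dict.get?_insert_self _ _ _, (hfirst a fa
                (PySem.Dict.get?_of_mem_items first hit hknd)).2⟩
        · rintro ⟨fa, hga, pc, hpc, hlt⟩
          rw [PySem.Dict.get?_insert_self] at hpc
          cases hpc
          cases hpv : prev.get? c with
          | none =>
            refine Or.inr ⟨rfl, fa, hfirstkeys hga, ?_⟩
            rw [PySem.Dict.getD_eq_get?_getD, hpv]
            exact le_trans (by norm_num) (hfirst a fa hga).1
          | some pc' =>
            by_cases hlt' : fa < pc'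
            · exact Or.inl ((hmem a c).mpr ⟨fa, hga, pc', hpv, hlt'⟩)
            · refine Or.inr ⟨rfl, fa, hfirstkeys hga, ?_⟩
              rw [PySem.Dict.getD_eq_get?_getD, hpv]
              exact not_lt.mp hlt'
      · have hpc' : (prev.insert x j).get? c = prev.get? c := by
          rw [PySem.Dict.get?_insert, if_neg hc]
        rw [hpc']
        constructor
        · rintro (hF | hm)
          · exact (hmem a c).mp hF
          · exact absurd (hnm.mp hm).1 hc
        · intro hr
          exact Or.inl ((hmem a c).mpr hr)
  · -- non-Sigma case: A's inner loop is a no-op and B neither emits nor bumps prev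
    have hsig : PySem.Set.contains (PySem.Set.ofList Sigma) x = false := by
      rw [← Bool.not_eq_true, PySem.Set.contains_iff]
      exact fun hm => hx ((PySem.Set.mem_ofList Sigma x).mp hm)
    simp only [followsStepA, followsStepB, hsig, Bool.false_eq_true, if_false]
    rw [foldlA_of_not_mem Sigma x hx]
    refine ⟨by omega, hFnd, hknd', hkeys', hout, hfirst', ?_, ?_⟩
    · intro k v hkv; have := hprev k v hkv; omega
    · intro a c
      rw [first_insert_rhs first prev x a c j (fun k v h => le_of_lt (hprev k v h))]
      exact hmem a c


lemma fold_inv (Sigma : List String) (trace : List String) :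
    ∀ (F : PySem.Set (String × String)) (S : PySem.Set String)
      (first prev : PySem.Dict String Int) (out : List (String × String)) (j : Int),
    FollowsInv F S first prev out j →
    FollowsInv
      (trace.foldl (followsStepA Sigma) (F, S)).1
      (trace.foldl (followsStepA Sigma) (F, S)).2
      (trace.foldl (followsStepB (PySem.Set.ofList Sigma)) (first, prev, out, j)).1
      (trace.foldl (followsStepB (PySem.Set.ofList Sigma)) (first, prev, out, j)).2.1
      (trace.foldl (followsStepB (PySem.Set.ofList Sigma)) (first, prev, out, j)).2.2.1
      (trace.foldl (followsStepB (PySem.Set.ofList Sigma)) (first, prev, out, j)).2.2.2 := by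
  induction trace with
  | nil => intro F S first prev out j h; exact h
  | cons x tr ih =>
    intro F S first prev out j h
    have hstep := step_inv Sigma x h
    have := ih (followsStepA Sigma (F, S) x).1 (followsStepA Sigma (F, S) x).2
      (followsStepB (PySem.Set.ofList Sigma) (first, prev, out, j) x).1
      (followsStepB (PySem.Set.ofList Sigma) (first, prev, out, j) x).2.1
      (followsStepB (PySem.Set.ofList Sigma) (first, prev, out, j) x).2.2.1
      (followsStepB (PySem.Set.ofList Sigma) (first, prev, out, j) x).2.2.2 hstep
    simpa [List.foldl] using this

-- ===== VERDICT (by name: the statement is the Claim_ definition above) =====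
theorem compute_follows_relation_spec : Claim_equal_compute_follows_relation := by
  intro trace Sigma _hdom
  unfold Spec_compute_follows_relation compute_follows_relation compute_follows_relation_alt
  have hinit : FollowsInv PySem.Set.empty PySem.Set.empty
      PySem.Dict.empty PySem.Dict.empty [] 0 := by
    refine ⟨le_refl 0, List.nodup_nil, ?_, rfl, rfl, ?_, ?_, ?_⟩
    · exact List.nodup_nil
    · intro k v h; simp [PySem.Dict.get?_empty] at h
    · intro k v h; simp [PySem.Dict.get?_empty] at h
    · intro a c; simp [PySem.Dict.get?_empty, PySem.Set.empty]
  have h := fold_inv Sigma trace PySem.Set.empty PySem.Set.empty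
    PySem.Dict.empty PySem.Dict.empty [] 0 hinit
  obtain ⟨_, hFnd, _, _, hout, _, _, _⟩ := h
  show (List.foldl (followsStepA Sigma) (PySem.Set.empty, PySem.Set.empty) trace).1
      = PySem.Set.ofList (List.foldl (followsStepB (PySem.Set.ofList Sigma))
          (PySem.Dict.empty, PySem.Dict.empty, [], 0) trace).2.2.1
  rw [hout, PySem.Set.ofList_eq_self_of_nodup _ hFnd]
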